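-- pv_equiv track=rewrite | github.com/janjunjon/master-core | src/ML/Other/HeavyRainCases.py | getIndexesLatLon
-- ===== SOURCE A (Python) =====
-- def getIndexesLatLon(LAT, LON):
--     count = 0
--     indexes = []
--     for lat in range(253):
--         for lon in range(241):
--             if lat in LAT and lon in LON:
--                 indexes.append(count)
--             count += 1
--     return indexes
-- ===== SOURCE B (Python) =====
-- def getIndexesLatLon(LAT, LON):
--     lats = sorted({lat for lat in LAT if 0 <= lat < 253})
--     lons = sorted({lon for lon in LON if 0 <= lon < 241})
--     return [lat * 241 + lon for lat in lats for lon in lons]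
-- ===== Notes on version B (the rewrite author's own statement) =====
-- stated objective: faster
-- what changed: Instead of scanning all 253*241 grid cells and testing membership in LAT/LON for each, B sorts the deduplicated in-range values of LAT and LON once and emits lat*241+lon directly for each valid pair.
import Mathlib
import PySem

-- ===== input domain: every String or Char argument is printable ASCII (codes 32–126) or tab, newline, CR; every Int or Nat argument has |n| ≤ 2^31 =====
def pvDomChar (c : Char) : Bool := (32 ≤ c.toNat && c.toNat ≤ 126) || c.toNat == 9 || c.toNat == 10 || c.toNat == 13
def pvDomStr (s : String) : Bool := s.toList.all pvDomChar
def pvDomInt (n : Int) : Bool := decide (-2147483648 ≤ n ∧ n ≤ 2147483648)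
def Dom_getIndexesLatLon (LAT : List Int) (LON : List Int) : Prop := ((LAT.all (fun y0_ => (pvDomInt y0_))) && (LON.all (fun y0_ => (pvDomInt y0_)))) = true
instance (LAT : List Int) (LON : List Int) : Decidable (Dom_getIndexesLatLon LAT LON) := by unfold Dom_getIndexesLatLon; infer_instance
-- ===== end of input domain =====

-- B replaces A's scan over all 253*241 grid cells (a membership test per cell) by
-- sorting the deduplicated in-range LAT/LON values once and emitting lat*241+lon
-- per matching pair only (objective: faster).

-- ===== PORT A =====
def getIndexesLatLon (LAT : List Int) (LON : List Int) : List Int :=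
  ((PySem.List.pyRange 0 253 1).foldl (fun (st : Int × List Int) lat =>
    (PySem.List.pyRange 0 241 1).foldl (fun (st : Int × List Int) lon =>
      (st.1 + 1, if lat ∈ LAT ∧ lon ∈ LON then st.2 ++ [st.1] else st.2)) st)
    (0, [])).2

-- ===== PORT B =====
def getIndexesLatLon_alt (LAT : List Int) (LON : List Int) : List Int :=
  let lats := PySem.List.sorted (PySem.Set.ofList (LAT.filter (fun x => 0 ≤ x && x < 253))) (fun x => x) false
  let lons := PySem.List.sorted (PySem.Set.ofList (LON.filter (fun x => 0 ≤ x && x < 241))) (fun x => x) false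
  lats.flatMap (fun lat => lons.map (fun lon => lat * 241 + lon))

-- ===== PRECONDITION & SPEC =====
def Spec_getIndexesLatLon (LAT : List Int) (LON : List Int) (out : List Int) : Prop := out = getIndexesLatLon_alt LAT LON
instance (LAT : List Int) (LON : List Int) (out : List Int) : Decidable (Spec_getIndexesLatLon LAT LON out) := by unfold Spec_getIndexesLatLon; infer_instance

-- ===== CLAIM (what is proved, stated in full; the proofs are below) =====
def Claim_equal_getIndexesLatLon : Prop := ∀ (LAT : List Int) (LON : List Int), Dom_getIndexesLatLon LAT LON → Spec_getIndexesLatLon LAT LON (getIndexesLatLon LAT LON)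

-- ===== LEMMAS AND PROOFS =====

-- sorted(set(x for x in xs if 0 <= x < bound)) enumerates exactly the integers
-- of [0, bound) that occur in xs, in increasing order.
theorem sorted_set_filter_eq (xs : List Int) (bound : Int) :
    PySem.List.sorted (PySem.Set.ofList (xs.filter (fun x => 0 ≤ x && x < bound))) (fun x => x) false
      = (PySem.List.pyRange 0 bound 1).filter (fun x => decide (x ∈ xs)) := by
  apply PySem.List.sorted_eq_of_perm_of_pairwise_lt
  · rw [List.perm_ext_iff_of_nodup ((PySem.List.nodup_pyRange_one 0 bound).filter _)
      (PySem.Set.nodup_ofList _)]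
    intro a
    simp [PySem.Set.mem_ofList, PySem.List.mem_pyRange_one, List.mem_filter]
    tauto
  · exact (PySem.List.pairwise_lt_pyRange_one 0 bound).filter _

-- A's inner loop: one sweep of lon over range(d, e) from state (count, acc).
theorem inner_loop (LAT LON : List Int) (lat : Int) :
    ∀ (n : Nat) (d e c : Int) (acc : List Int), e - d = (n : Int) →
    (PySem.List.pyRange d e 1).foldl (fun (st : Int × List Int) lon =>
        (st.1 + 1, if lat ∈ LAT ∧ lon ∈ LON then st.2 ++ [st.1] else st.2)) (c, acc)
      = (c + (n : Int),
         acc ++ ((PySem.List.pyRange d e 1).filter (fun lon => decide (lat ∈ LAT ∧ lon ∈ LON))).map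
            (fun lon => c + (lon - d))) := by
  intro n
  induction n with
  | zero =>
    intro d e c acc he
    rw [PySem.List.pyRange_one_eq_nil (by omega)]
    simp
  | succ k ih =>
    intro d e c acc he
    rw [PySem.List.pyRange_one_cons (by push_cast at he ⊢; omega)]
    simp only [List.foldl_cons, List.filter_cons]
    rw [ih (d + 1) e _ _ (by push_cast at he ⊢; omega)]
    by_cases hc : lat ∈ LAT ∧ d ∈ LON
    · rw [if_pos hc]
      simp only [hc, decide_true, if_true, true_and, List.map_cons,
        Prod.mk.injEq]
      constructor
      · push_cast; ring
      · rw [List.append_assoc, List.singleton_append]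
        congr 1
        congr 1
        · omega
        · apply List.map_congr_left; intro x _; omega
    · rw [if_neg hc]
      simp only [hc, decide_false, Bool.false_eq_true, if_false, Prod.mk.injEq]
      constructor
      · push_cast; ring
      · congr 1
        apply List.map_congr_left; intro x _; omega

-- A's outer loop: sweeps lat over range(d, e); count advances by 241 per row.
theorem outer_loop (LAT LON : List Int) :
    ∀ (n : Nat) (d e c : Int) (acc : List Int), e - d = (n : Int) →
    (PySem.List.pyRange d e 1).foldl
        (fun (st : Int × List Int) lat =>
          (PySem.List.pyRange 0 241 1).foldl (fun (st : Int × List Int) lon =>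
            (st.1 + 1, if lat ∈ LAT ∧ lon ∈ LON then st.2 ++ [st.1] else st.2)) st) (c, acc)
      = (c + 241 * (n : Int),
         acc ++ (PySem.List.pyRange d e 1).flatMap (fun lat =>
            ((PySem.List.pyRange 0 241 1).filter (fun lon => decide (lat ∈ LAT ∧ lon ∈ LON))).map
              (fun lon => c + 241 * (lat - d) + lon))) := by
  intro n
  induction n with
  | zero =>
    intro d e c acc he
    rw [show PySem.List.pyRange d e 1 = [] from PySem.List.pyRange_one_eq_nil (by omega)]
    simp
  | succ k ih =>
    intro d e c acc he
    rw [show PySem.List.pyRange d e 1 = d :: PySem.List.pyRange (d + 1) e 1 from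
      PySem.List.pyRange_one_cons (by omega)]
    simp only [List.foldl_cons, List.flatMap_cons]
    rw [inner_loop LAT LON d 241 0 241 c acc (by norm_num)]
    rw [ih (d + 1) e _ _ (by push_cast at he ⊢; omega)]
    simp only [Prod.mk.injEq]
    constructor
    · push_cast; ring
    · rw [List.append_assoc]
      congr 1
      congr 1
      · apply List.map_congr_left; intro x _; omega
      · apply List.flatMap_congr
        intro lat _
        apply List.map_congr_left
        intro lon _
        push_cast
        ring

-- flatMap over a list equals flatMap over its filtered sublist when the body is
-- empty off the filter.
theorem flatMap_filter_of_nil {α β : Type} (l : List α) (p : α → Bool) (g : α → List β)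
    (h : ∀ x ∈ l, p x = false → g x = []) :
    l.flatMap g = (l.filter p).flatMap g := by
  induction l with
  | nil => rfl
  | cons a t ih =>
    have ih' := ih (fun x hx hpx => h x (List.mem_cons_of_mem a hx) hpx)
    simp only [List.flatMap_cons, List.filter_cons]
    cases hp : p a with
    | true => simp only [if_true, List.flatMap_cons, ih']
    | false =>
      simp only [Bool.false_eq_true, if_false]
      rw [h a List.mem_cons_self hp, List.nil_append, ih']

-- ===== VERDICT (by name: the statement is the Claim_ definition above) =====
theorem getIndexesLatLon_spec : Claim_equal_getIndexesLatLon := by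
  intro LAT LON _
  unfold Spec_getIndexesLatLon getIndexesLatLon getIndexesLatLon_alt
  rw [outer_loop LAT LON 253 0 253 0 [] (by norm_num)]
  simp only [List.nil_append]
  rw [sorted_set_filter_eq LAT 253, sorted_set_filter_eq LON 241]
  rw [flatMap_filter_of_nil (PySem.List.pyRange 0 253 1) (fun x => decide (x ∈ LAT))]
  · apply List.flatMap_congr  -- pointwise equality of the bodies on the filtered lats
    intro lat hlat
    have hl : lat ∈ LAT := by simpa using (List.mem_filter.mp hlat).2
    rw [show List.filter (fun lon => decide (lat ∈ LAT ∧ lon ∈ LON)) (PySem.List.pyRange 0 241 1)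
        = List.filter (fun lon => decide (lon ∈ LON)) (PySem.List.pyRange 0 241 1) from
      List.filter_congr (fun lon _ => by simp [hl])]
    apply List.map_congr_left
    intro lon _
    omega
  · intro lat _ hlat
    simp only [decide_eq_false_iff_not] at hlat
    have : (PySem.List.pyRange 0 241 1).filter (fun lon => decide (lat ∈ LAT ∧ lon ∈ LON)) = [] := by
      apply List.filter_eq_nil_iff.mpr
      intro lon _
      simp [hlat]
    rw [this, List.map_nil]
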